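-- pv_equiv track=rewrite | github.com/liuhuipy/Algorithm-python | test/maxCha.py | getDis
-- ===== SOURCE A (Python) =====
-- def getDis(A, n):
--     # write code here
--     min = A[0]
--     maxCha = 0
--     for i in range(1,n):
--         if A[i] < min:
--             min = A[i]
--         cha = A[i] - min
--         if cha > maxCha:
--             maxCha = cha
--     return maxCha
-- ===== SOURCE B (Python) =====
-- def getDis(A, n):
--     # two-pass: build a prefix-minimum table, then reduce the gaps
--     m = [A[0]]
--     for i in range(1, n):
--         m.append(min(m[-1], A[i]))
--     diffs = [A[i] - m[i - 1] for i in range(1, n)]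
--     best = max(diffs, default=0)
--     return max(0, best)
-- ===== Notes on version B (the rewrite author's own statement) =====
-- stated objective: alternative
-- what changed: Replaces the single fused loop carrying (min, maxCha) state by two separate passes: first build a prefix-minimum table, then reduce the list of gaps A[i]-m[i-1] with max and clamp at 0.
import Mathlib
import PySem

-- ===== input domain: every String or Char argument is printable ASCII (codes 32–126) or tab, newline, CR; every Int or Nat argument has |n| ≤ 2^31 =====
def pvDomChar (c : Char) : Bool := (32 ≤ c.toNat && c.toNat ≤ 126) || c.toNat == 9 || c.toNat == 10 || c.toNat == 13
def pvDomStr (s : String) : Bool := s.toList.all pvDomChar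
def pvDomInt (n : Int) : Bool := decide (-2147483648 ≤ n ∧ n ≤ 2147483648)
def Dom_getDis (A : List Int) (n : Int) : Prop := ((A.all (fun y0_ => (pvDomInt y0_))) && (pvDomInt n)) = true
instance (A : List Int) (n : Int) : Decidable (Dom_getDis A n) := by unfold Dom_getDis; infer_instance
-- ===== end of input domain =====

-- B replaces A's fused min/maxCha loop by two passes (prefix-minimum table, then a max-reduction of the gaps); same cost, different decomposition. Pre_ excludes exactly the inputs where Python A raises IndexError (empty A or n > len(A)).


-- ===== PORT A =====
def getDis (A : List Int) (n : Int) : Int :=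
  (((PySem.List.pyRange 1 n 1).foldl
    (fun (s : Int × Int) i =>
      let m := if PySem.List.pyGetD A i 0 < s.1 then PySem.List.pyGetD A i 0 else s.1
      let cha := PySem.List.pyGetD A i 0 - m
      (m, if cha > s.2 then cha else s.2))
    (PySem.List.pyGetD A 0 0, 0)) : Int × Int).2

-- ===== PORT B =====
def getDis_alt (A : List Int) (n : Int) : Int :=
  let m := (PySem.List.pyRange 1 n 1).foldl
    (fun acc i => acc ++ [min (PySem.List.pyGetD acc (-1) 0) (PySem.List.pyGetD A i 0)])
    [PySem.List.pyGetD A 0 0]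
  let diffs := (PySem.List.pyRange 1 n 1).map
    (fun i => PySem.List.pyGetD A i 0 - PySem.List.pyGetD m (i - 1) 0)
  let best : Int := match diffs with
    | [] => 0
    | x :: xs => xs.foldl max x
  max 0 best

-- ===== PRECONDITION & SPEC =====
-- Pre_ excludes exactly the inputs on which Python A raises IndexError: empty A (A[0]) or n > len(A) (A[i] out of range in the loop).
def Pre_getDis (A : List Int) (n : Int) : Prop := A ≠ [] ∧ n ≤ (A.length : Int)
instance (A : List Int) (n : Int) : Decidable (Pre_getDis A n) := by unfold Pre_getDis; infer_instance
def pvWitness_getDis : List Int × Int := ([3, 1, 4, 1, 5], 5)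
def Spec_getDis (A : List Int) (n : Int) (out : Int) : Prop := out = getDis_alt A n
instance (A : List Int) (n : Int) (out : Int) : Decidable (Spec_getDis A n out) := by unfold Spec_getDis; infer_instance

-- ===== CLAIM (what is proved, stated in full; the proofs are below) =====
def Claim_equal_getDis : Prop := ∀ (A : List Int) (n : Int), Dom_getDis A n → Pre_getDis A n → Spec_getDis A n (getDis A n)

-- ===== LEMMAS AND PROOFS =====

-- prefix minimum of A[0..k]
def pmin (A : List Int) : Nat → Int
  | 0 => A.getD 0 0
  | k + 1 => min (pmin A k) (A.getD (k + 1) 0)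

-- prefix-minimum table [pmin 0, …, pmin k]
def mtab (A : List Int) (k : Nat) : List Int := (List.range (k + 1)).map (pmin A)

-- gap list [A[1]-pmin 0, …, A[k]-pmin (k-1)]
def dlist (A : List Int) : Nat → List Int
  | 0 => []
  | k + 1 => dlist A k ++ [A.getD (k + 1) 0 - pmin A k]

theorem mtab_succ (A : List Int) (k : Nat) :
    mtab A (k + 1) = mtab A k ++ [pmin A (k + 1)] := by
  simp [mtab, List.range_succ]

theorem mtab_eq_append (A : List Int) (k : Nat) :
    ∃ pre, mtab A k = pre ++ [pmin A k] := by
  cases k with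
  | zero => exact ⟨[], by simp [mtab]⟩
  | succ k => exact ⟨mtab A k, mtab_succ A k⟩

theorem pyGetD_mtab_last (A : List Int) (k : Nat) :
    PySem.List.pyGetD (mtab A k) (-1) 0 = pmin A k := by
  obtain ⟨pre, h⟩ := mtab_eq_append A k
  rw [h, PySem.List.pyGetD_neg_one_append_singleton]

theorem pyGetD_mtab (A : List Int) (k j : Nat) (h : j ≤ k) :
    PySem.List.pyGetD (mtab A k) (j : Int) 0 = pmin A j := by
  simp only [mtab, PySem.List.pyGetD_natCast]
  rw [List.getD_eq_getElem?_getD]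
  simp [Nat.lt_succ_of_le h]

theorem foldl_max_comm (l : List Int) : ∀ x c : Int,
    max c (l.foldl max x) = l.foldl max (max c x) := by
  induction l with
  | nil => intro x c; rfl
  | cons y ys ih =>
    intro x c
    simp only [List.foldl_cons]
    rw [ih]
    congr 1
    omega

theorem le_foldl_max (l : List Int) : ∀ x : Int, x ≤ l.foldl max x := by
  induction l with
  | nil => intro x; exact le_refl x
  | cons y ys ih =>
    intro x
    exact le_trans (le_max_left x y) (ih (max x y))

-- A's fold over range(1, 1+k) computes the prefix minimum and the clamped maximum gap
theorem foldA_eq (A : List Int) (k : Nat) :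
    ((PySem.List.pyRange 1 (1 + (k : Int)) 1).foldl
      (fun (s : Int × Int) i =>
        let m := if PySem.List.pyGetD A i 0 < s.1 then PySem.List.pyGetD A i 0 else s.1
        let cha := PySem.List.pyGetD A i 0 - m
        (m, if cha > s.2 then cha else s.2))
      (PySem.List.pyGetD A 0 0, 0))
    = (pmin A k, (dlist A k).foldl max 0) := by
  induction k with
  | zero =>
    rw [PySem.List.pyRange_one_eq_nil (by omega)]
    simp [pmin, dlist, PySem.List.pyGetD_zero]
  | succ k ih =>
    have hsplit : (1 + ((k : Int) + 1)) = (1 + (k : Int)) + 1 := by ring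
    rw [show ((k + 1 : Nat) : Int) = (k : Int) + 1 by push_cast; ring, hsplit,
        PySem.List.pyRange_one_succ_right (by omega), List.foldl_append, ih]
    simp only [List.foldl_cons, List.foldl_nil]
    have hidx : PySem.List.pyGetD A (1 + (k : Int)) 0 = A.getD (k + 1) 0 := by
      rw [show (1 + (k : Int)) = ((k + 1 : Nat) : Int) by push_cast; ring,
          PySem.List.pyGetD_natCast]
    have h0 : (0 : Int) ≤ (dlist A k).foldl max 0 := le_foldl_max _ 0
    simp only [hidx, dlist, List.foldl_append, List.foldl_cons, List.foldl_nil, pmin]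
    rw [Prod.mk.injEq]
    refine ⟨?_, ?_⟩ <;> (split_ifs <;> omega)

-- B's first fold builds exactly the prefix-minimum table
theorem foldB_eq (A : List Int) (k : Nat) :
    ((PySem.List.pyRange 1 (1 + (k : Int)) 1).foldl
      (fun acc i => acc ++ [min (PySem.List.pyGetD acc (-1) 0) (PySem.List.pyGetD A i 0)])
      [PySem.List.pyGetD A 0 0])
    = mtab A k := by
  induction k with
  | zero =>
    rw [PySem.List.pyRange_one_eq_nil (by omega)]
    simp [mtab, pmin, PySem.List.pyGetD_zero]
  | succ k ih =>
    have hsplit : (1 + ((k : Int) + 1)) = (1 + (k : Int)) + 1 := by ring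
    rw [show ((k + 1 : Nat) : Int) = (k : Int) + 1 by push_cast; ring, hsplit,
        PySem.List.pyRange_one_succ_right (by omega), List.foldl_append, ih]
    simp only [List.foldl_cons, List.foldl_nil]
    rw [pyGetD_mtab_last, mtab_succ]
    congr 2
    rw [show (1 + (k : Int)) = ((k + 1 : Nat) : Int) by push_cast; ring,
        PySem.List.pyGetD_natCast]
    simp [pmin]

-- B's comprehension over the finished table is dlist
theorem diffs_eq (A : List Int) (K : Nat) : ∀ k : Nat, k ≤ K →
    ((PySem.List.pyRange 1 (1 + (k : Int)) 1).map
      (fun i => PySem.List.pyGetD A i 0 - PySem.List.pyGetD (mtab A K) (i - 1) 0))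
    = dlist A k := by
  intro k
  induction k with
  | zero => intro _; rw [PySem.List.pyRange_one_eq_nil (by omega)]; rfl
  | succ k ih =>
    intro hk
    have hsplit : (1 + ((k : Int) + 1)) = (1 + (k : Int)) + 1 := by ring
    rw [show ((k + 1 : Nat) : Int) = (k : Int) + 1 by push_cast; ring, hsplit,
        PySem.List.pyRange_one_succ_right (by omega), List.map_append,
        ih (Nat.le_of_succ_le hk)]
    simp only [List.map_cons, List.map_nil, dlist]
    congr 2
    rw [show (1 + (k : Int)) = ((k + 1 : Nat) : Int) by push_cast; ring,
        PySem.List.pyGetD_natCast]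
    congr 1
    rw [show ((k + 1 : Nat) : Int) - 1 = ((k : Nat) : Int) by push_cast; ring,
        pyGetD_mtab A K k (by omega)]

theorem clamp_best (l : List Int) :
    max 0 (match l with | [] => (0 : Int) | x :: xs => xs.foldl max x) = l.foldl max 0 := by
  cases l with
  | nil => rfl
  | cons x xs =>
    simp only [List.foldl_cons]
    rw [foldl_max_comm]

-- ===== VERDICT (by name: the statement is the Claim_ definition above) =====
theorem getDis_spec : Claim_equal_getDis := by
  intro A n _ _
  unfold Spec_getDis getDis getDis_alt
  by_cases hn : n ≤ 1
  · rw [PySem.List.pyRange_one_eq_nil hn]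
    rfl
  · have hk : n = 1 + ((n - 1).toNat : Int) := by omega
    rw [hk, foldA_eq, foldB_eq]
    show (pmin A (n - 1).toNat, (dlist A (n - 1).toNat).foldl max 0).2 =
      max 0 (match (PySem.List.pyRange 1 (1 + ((n - 1).toNat : Int)) 1).map
        (fun i => PySem.List.pyGetD A i 0 - PySem.List.pyGetD (mtab A (n - 1).toNat) (i - 1) 0) with
        | [] => (0 : Int) | x :: xs => xs.foldl max x)
    rw [diffs_eq A (n - 1).toNat (n - 1).toNat (le_refl _), clamp_best]
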